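-- pv_equiv track=rewrite | github.com/bernvaughn/PHY399_robotics | wwaldo/wwaldo.py | firstOccurances
-- ===== SOURCE A (Python) =====
-- def firstOccurances(bImage):
--     '''In: bImage 2-dimensional list of post-blob-searched image
--     Out: Dict of values of objects with top-left bound
--     '''
--     resultDict = dict() # model: val = [Y,X]
--
--     for yi in range(len(bImage)):
--         for xi in range(len(bImage[0])):
--             thisVal = bImage[yi][xi]
--             if thisVal != 0:
--                 if thisVal in resultDict:
--                     newY = min(resultDict[thisVal][0],yi)
--                     newX = min(resultDict[thisVal][1],xi)
--                     resultDict[thisVal] = [newY,newX]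
--                 else:
--                     resultDict[thisVal] = [yi,xi]
--
--     return resultDict
-- ===== SOURCE B (Python) =====
-- def firstOccurances(bImage):
--     '''In: bImage 2-dimensional list of post-blob-searched image
--     Out: Dict of values of objects with top-left bound
--     '''
--     # pass 1: group every nonzero pixel's coordinates by value (first-seen key order)
--     groups = {}  # val -> list of (y, x)
--     if bImage:
--         w = len(bImage[0])
--         for yi, row in enumerate(bImage):
--             for xi in range(w):
--                 v = row[xi]
--                 if v != 0:
--                     groups.setdefault(v, []).append((yi, xi))
--     # pass 2: reduce each group to its top-left bound [min of ys, min of xs]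
--     return {v: [min(p[0] for p in pts), min(p[1] for p in pts)]
--             for v, pts in groups.items()}
-- ===== Notes on version B (the rewrite author's own statement) =====
-- stated objective: alternative
-- what changed: B first gathers every nonzero pixel's (y,x) into per-value occurrence lists (dict grouping, first-seen key order) and then a second pass reduces each group to [min of ys, min of xs], instead of A's single scan that keeps a running [minY,minX] in the dict.
import Mathlib
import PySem

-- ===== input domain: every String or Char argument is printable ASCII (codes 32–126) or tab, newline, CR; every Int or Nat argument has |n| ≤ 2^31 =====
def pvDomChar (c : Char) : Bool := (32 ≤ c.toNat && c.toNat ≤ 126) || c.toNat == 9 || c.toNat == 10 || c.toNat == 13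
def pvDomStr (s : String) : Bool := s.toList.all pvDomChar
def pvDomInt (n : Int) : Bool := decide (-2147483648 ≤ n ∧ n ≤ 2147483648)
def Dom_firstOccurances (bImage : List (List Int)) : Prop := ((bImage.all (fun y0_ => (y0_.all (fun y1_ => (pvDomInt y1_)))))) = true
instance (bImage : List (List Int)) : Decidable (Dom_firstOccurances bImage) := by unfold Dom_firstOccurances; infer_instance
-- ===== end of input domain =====

-- B replaces A's running-[minY,minX] scan by a gather pass (per-value occurrence lists,
-- first-seen key order) plus a reduce pass taking min of ys / min of xs per group — an
-- alternative decomposition of the same cost; equal output on all non-ragged inputs (Pre_).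
-- ===== PORT A =====
def firstOccurances (bImage : List (List Int)) : List (Int × List Int) :=
  -- resultDict = dict(); for yi in range(len(bImage)): for xi in range(len(bImage[0])): …
  -- indexing bImage[yi], bImage[yi][xi], resultDict[thisVal][0/1] is always in range on Pre_, ported with pyGetD
  (PySem.List.pyRange 0 (PySem.List.len bImage) 1).foldl (fun d yi =>
    (PySem.List.pyRange 0 (PySem.List.len (PySem.List.pyGetD bImage 0 [])) 1).foldl (fun d xi =>
      let thisVal := PySem.List.pyGetD (PySem.List.pyGetD bImage yi []) xi 0
      if thisVal ≠ 0 then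
        if d.contains thisVal then
          let newY := min (PySem.List.pyGetD (d.getD thisVal []) 0 0) yi
          let newX := min (PySem.List.pyGetD (d.getD thisVal []) 1 0) xi
          d.insert thisVal [newY, newX]
        else
          d.insert thisVal [yi, xi]
      else d) d)
    (PySem.Dict.empty : PySem.Dict Int (List Int)) |>.items

-- ===== PORT B =====
-- min(p[0] for p in pts): min of a generated list; the default 0 is never read (every group is nonempty)
def pvMinG (l : List Int) : Int := (PySem.List.min? l (fun x => x)).getD 0

def firstOccurances_alt (bImage : List (List Int)) : List (Int × List Int) :=
  -- pass 1: groups.setdefault(v, []).append((yi, xi)) == groups[v] = groups.get(v, []) + [(yi, xi)], i.e. Dict.modify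
  let groups : PySem.Dict Int (List (Int × Int)) :=
    if bImage.isEmpty then PySem.Dict.empty
    else
      let w := PySem.List.len (PySem.List.pyGetD bImage 0 [])
      (PySem.List.enumerate bImage).foldl (fun g p =>
        (PySem.List.pyRange 0 w 1).foldl (fun g xi =>
          let v := PySem.List.pyGetD p.2 xi 0
          if v ≠ 0 then g.modify v [] (· ++ [(p.1, xi)]) else g) g)
        PySem.Dict.empty
  -- pass 2: {v: [min of ys, min of xs] for v, pts in groups.items()}
  groups.items.map (fun q => (q.1, [pvMinG (q.2.map Prod.fst), pvMinG (q.2.map Prod.snd)]))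

-- ===== PRECONDITION & SPEC =====
-- Pre_ excludes exactly the ragged inputs on which Python A raises IndexError (a row shorter
-- than row 0, read at bImage[yi][xi] for xi < len(bImage[0])); A returns on everything Pre_ admits.
def Pre_firstOccurances (bImage : List (List Int)) : Prop :=
  ∀ row ∈ bImage, (bImage.headD []).length ≤ row.length
instance (bImage : List (List Int)) : Decidable (Pre_firstOccurances bImage) := by
  unfold Pre_firstOccurances; infer_instance

def pvWitness_firstOccurances : List (List Int) := [[1, 0], [0, 2]]

def Spec_firstOccurances (bImage : List (List Int)) (out : List (Int × List Int)) : Prop := out = firstOccurances_alt bImage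
instance (bImage : List (List Int)) (out : List (Int × List Int)) : Decidable (Spec_firstOccurances bImage out) := by unfold Spec_firstOccurances; infer_instance

-- ===== CLAIM (what is proved, stated in full; the proofs are below) =====
def Claim_equal_firstOccurances : Prop := ∀ (bImage : List (List Int)), Dom_firstOccurances bImage → Pre_firstOccurances bImage → Spec_firstOccurances bImage (firstOccurances bImage)

-- ===== LEMMAS AND PROOFS =====

-- The stream of (yi, xi, value) cells both programs visit, in visiting order
def pvCells (bImage : List (List Int)) : List (Int × Int × Int) :=
  (PySem.List.pyRange 0 (PySem.List.len bImage) 1).flatMap (fun yi =>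
    (PySem.List.pyRange 0 (PySem.List.len (PySem.List.pyGetD bImage 0 [])) 1).map (fun xi =>
      (yi, xi, PySem.List.pyGetD (PySem.List.pyGetD bImage yi []) xi 0)))

-- A's loop body on one cell
def pvStepA (d : PySem.Dict Int (List Int)) (c : Int × Int × Int) : PySem.Dict Int (List Int) :=
  if c.2.2 ≠ 0 then
    if d.contains c.2.2 then
      d.insert c.2.2 [min (PySem.List.pyGetD (d.getD c.2.2 []) 0 0) c.1,
                      min (PySem.List.pyGetD (d.getD c.2.2 []) 1 0) c.2.1]
    else d.insert c.2.2 [c.1, c.2.1]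
  else d

-- B's gather-loop body on one cell
def pvStepB (g : PySem.Dict Int (List (Int × Int))) (c : Int × Int × Int) : PySem.Dict Int (List (Int × Int)) :=
  if c.2.2 ≠ 0 then g.modify c.2.2 [] (· ++ [(c.1, c.2.1)]) else g

-- B's pass-2 reduction of one group / of the whole grouping dict
def pvRed (pts : List (Int × Int)) : List Int :=
  [pvMinG (pts.map Prod.fst), pvMinG (pts.map Prod.snd)]

def pvReduce (g : PySem.Dict Int (List (Int × Int))) : PySem.Dict Int (List Int) :=
  PySem.Dict.mk (g.items.map (fun q => (q.1, pvRed q.2)))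

def pvInv (g : PySem.Dict Int (List (Int × Int))) : Prop :=
  g.keys.Nodup ∧ ∀ q ∈ g.items, q.2 ≠ []

lemma pvA_as_cells (bImage : List (List Int)) :
    firstOccurances bImage = ((pvCells bImage).foldl pvStepA PySem.Dict.empty).items := by
  unfold firstOccurances pvCells
  rw [List.foldl_flatMap]
  simp only [List.foldl_map]
  rfl

lemma pvB_as_cells (bImage : List (List Int)) :
    firstOccurances_alt bImage = (pvReduce ((pvCells bImage).foldl pvStepB PySem.Dict.empty)).items := by
  unfold firstOccurances_alt pvCells
  by_cases hb : bImage.isEmpty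
  · rw [List.isEmpty_iff] at hb
    subst hb
    rfl
  · rw [if_neg (by simpa using hb)]
    rw [PySem.List.enumerate_eq_map_pyRange bImage []]
    rw [List.foldl_flatMap]
    simp only [List.foldl_map]
    simp only [pvReduce, pvRed, pvStepB]

lemma pvMinG_cons (a : Int) (t : List Int) : pvMinG (a :: t) = t.foldl min a := by
  simp [pvMinG, PySem.List.min?_id_cons]

lemma pvMinG_cons_append (a : Int) (t : List Int) (x : Int) :
    pvMinG (a :: t ++ [x]) = min (pvMinG (a :: t)) x := by
  rw [List.cons_append, pvMinG_cons a (t ++ [x]), List.foldl_append, pvMinG_cons]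
  simp

lemma pvKeys_reduce (g : PySem.Dict Int (List (Int × Int))) : (pvReduce g).keys = g.keys := by
  simp [pvReduce, PySem.Dict.keys]

lemma pvContains_reduce (g : PySem.Dict Int (List (Int × Int))) (v : Int) :
    (pvReduce g).contains v = g.contains v := by
  simp [pvReduce, PySem.Dict.contains, List.any_map, Function.comp_def]

lemma pvRed_append (w : List (Int × Int)) (hw : w ≠ []) (y x : Int) :
    pvRed (w ++ [(y, x)]) =
      [min (PySem.List.pyGetD (pvRed w) 0 0) y, min (PySem.List.pyGetD (pvRed w) 1 0) x] := by
  match w, hw with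
  | (a, b) :: t, _ =>
    have h1 : (((a, b) :: t) ++ [(y, x)]).map Prod.fst = (a :: t.map Prod.fst) ++ [y] := by simp
    have h2 : (((a, b) :: t) ++ [(y, x)]).map Prod.snd = (b :: t.map Prod.snd) ++ [x] := by simp
    simp only [pvRed, h1, h2, pvMinG_cons_append, List.map_cons]
    simp [PySem.List.pyGetD]

lemma pvStep_commute (g : PySem.Dict Int (List (Int × Int))) (c : Int × Int × Int) (h : pvInv g) :
    pvStepA (pvReduce g) c = pvReduce (pvStepB g c) := by
  obtain ⟨hnd, hne⟩ := h
  unfold pvStepA pvStepB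
  by_cases hv : c.2.2 = 0
  · simp [hv]
  · simp only [ne_eq, hv, not_false_eq_true, if_true, PySem.Dict.modify, pvContains_reduce]
    by_cases hc : g.contains c.2.2 = true
    · rw [if_pos hc]
      obtain ⟨w, hw⟩ : ∃ w, g.get? c.2.2 = some w := by
        have := PySem.Dict.contains_eq_isSome_get? g c.2.2
        rw [hc] at this
        exact Option.isSome_iff_exists.mp this.symm
      have hwmem : (c.2.2, w) ∈ g.items :=
        (PySem.Dict.get?_eq_some_iff_mem_items g _ _ hnd).mp hw
      have hwne : w ≠ [] := hne _ hwmem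
      have hgd : g.getD c.2.2 [] = w := PySem.Dict.getD_of_get?_eq_some g [] hw
      have hrmem : (c.2.2, pvRed w) ∈ (pvReduce g).items := by
        simp only [pvReduce]
        exact List.mem_map.mpr ⟨(c.2.2, w), hwmem, rfl⟩
      have hrnd : (pvReduce g).keys.Nodup := by rw [pvKeys_reduce]; exact hnd
      have hrg : (pvReduce g).getD c.2.2 [] = pvRed w := by
        have := (PySem.Dict.get?_eq_some_iff_mem_items (pvReduce g) c.2.2 (pvRed w) hrnd).mpr hrmem
        exact PySem.Dict.getD_of_get?_eq_some _ [] this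
      rw [hgd, hrg]
      apply PySem.Dict.ext
      rw [PySem.Dict.items_insert_of_contains _ _ (by rw [pvContains_reduce]; exact hc)]
      show _ = ((g.insert c.2.2 (w ++ [(c.1, c.2.1)])).items).map _
      rw [PySem.Dict.items_insert_of_contains _ _ hc]
      show List.map _ ((pvReduce g).items) = _
      simp only [pvReduce, List.map_map]
      apply List.map_congr_left
      intro q _
      by_cases hq : q.1 == c.2.2
      · simp only [Function.comp_apply, hq, if_pos]
        exact (congrArg (fun l => (c.2.2, l)) (pvRed_append w hwne c.1 c.2.1)).symm
      · simp only [Function.comp_apply, hq]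
        simp
    · rw [if_neg hc]
      have hgd : g.getD c.2.2 [] = [] :=
        PySem.Dict.getD_of_not_contains g [] (by simpa using hc)
      rw [hgd]
      apply PySem.Dict.ext
      rw [PySem.Dict.items_insert_of_not_contains _ _ (by rw [pvContains_reduce]; simpa using hc)]
      show _ = ((g.insert c.2.2 ([] ++ [(c.1, c.2.1)])).items).map _
      rw [PySem.Dict.items_insert_of_not_contains _ _ (by simpa using hc)]
      simp [pvReduce, pvRed, pvMinG_cons]

lemma pvInv_step (g : PySem.Dict Int (List (Int × Int))) (c : Int × Int × Int) (h : pvInv g) :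
    pvInv (pvStepB g c) := by
  obtain ⟨hnd, hne⟩ := h
  unfold pvStepB
  by_cases hv : c.2.2 = 0
  · simp only [hv]
    simp
    exact ⟨hnd, hne⟩
  · rw [if_pos (by simpa using hv), PySem.Dict.modify]
    constructor
    · exact PySem.Dict.nodup_keys_insert g _ _ hnd
    · intro q hq
      rw [PySem.Dict.mem_items_insert] at hq
      rcases hq with hq | ⟨hq, _⟩
      · subst hq; simp
      · exact hne _ hq

lemma pvFold_commute (cells : List (Int × Int × Int)) :
    ∀ (g : PySem.Dict Int (List (Int × Int))), pvInv g →
      cells.foldl pvStepA (pvReduce g) = pvReduce (cells.foldl pvStepB g) := by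
  induction cells with
  | nil => intro g _; rfl
  | cons c cs ih =>
    intro g hg
    simp only [List.foldl_cons]
    rw [pvStep_commute g c hg]
    exact ih _ (pvInv_step g c hg)

-- ===== VERDICT (by name: the statement is the Claim_ definition above) =====
theorem firstOccurances_spec : Claim_equal_firstOccurances := by
  intro bImage _ _
  unfold Spec_firstOccurances
  rw [pvA_as_cells, pvB_as_cells]
  have h0 : pvInv (PySem.Dict.empty : PySem.Dict Int (List (Int × Int))) := by
    constructor
    · simp [PySem.Dict.keys, PySem.Dict.empty]
    · intro q hq; simp [PySem.Dict.empty] at hq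
  have : pvReduce (PySem.Dict.empty : PySem.Dict Int (List (Int × Int))) = PySem.Dict.empty := rfl
  rw [← this, pvFold_commute _ _ h0]
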